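-- pv_equiv track=rewrite | github.com/brstu/GIIS-2023 | trunk/ii200106/task_01/functions.py | check
-- ===== SOURCE A (Python) =====
-- def check(image, x, y, x_width, y_width):
--     avg_pixel = [0,0,0]
--     pixels_in_avg = 0
--     for x_ in range(int(-1*x_width/2),int(x_width/2) + 1):
--         for y_ in range(int(-1*y_width/2),int(y_width/2) + 1):
--             if (x+x_>=0) and (y+y_>=0) and (x+x_<len(image)) and (y+y_<len(image[0])):
--                 pixels_in_avg+=1
--                 avg_pixel[0] += image[x+x_][y+y_][0]
--                 avg_pixel[1] += image[x+x_][y+y_][1]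
--                 avg_pixel[2] += image[x+x_][y+y_][2]
--     return avg_pixel, pixels_in_avg
-- ===== SOURCE B (Python) =====
-- def check(image, x, y, x_width, y_width):
--     r = g = b = 0
--     count = 0
--     x_lo = max(x + int(-1 * x_width / 2), 0)
--     x_hi = min(x + int(x_width / 2), len(image) - 1)
--     if x_lo <= x_hi:
--         y_lo = max(y + int(-1 * y_width / 2), 0)
--         y_hi = min(y + int(y_width / 2), len(image[0]) - 1)
--         if y_lo <= y_hi:
--             count = (x_hi - x_lo + 1) * (y_hi - y_lo + 1)
--             for xi in range(x_lo, x_hi + 1):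
--                 row = image[xi]
--                 for yi in range(y_lo, y_hi + 1):
--                     px = row[yi]
--                     r += px[0]
--                     g += px[1]
--                     b += px[2]
--     return [r, g, b], count
-- ===== Notes on version B (the rewrite author's own statement) =====
-- stated objective: faster
-- what changed: B computes the clamped overlap rectangle of the window and the image up front and sums only over it, with the pixel count obtained as the product of the two range sizes, instead of A's scan of the whole window with a per-pixel bounds test.
import Mathlib
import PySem

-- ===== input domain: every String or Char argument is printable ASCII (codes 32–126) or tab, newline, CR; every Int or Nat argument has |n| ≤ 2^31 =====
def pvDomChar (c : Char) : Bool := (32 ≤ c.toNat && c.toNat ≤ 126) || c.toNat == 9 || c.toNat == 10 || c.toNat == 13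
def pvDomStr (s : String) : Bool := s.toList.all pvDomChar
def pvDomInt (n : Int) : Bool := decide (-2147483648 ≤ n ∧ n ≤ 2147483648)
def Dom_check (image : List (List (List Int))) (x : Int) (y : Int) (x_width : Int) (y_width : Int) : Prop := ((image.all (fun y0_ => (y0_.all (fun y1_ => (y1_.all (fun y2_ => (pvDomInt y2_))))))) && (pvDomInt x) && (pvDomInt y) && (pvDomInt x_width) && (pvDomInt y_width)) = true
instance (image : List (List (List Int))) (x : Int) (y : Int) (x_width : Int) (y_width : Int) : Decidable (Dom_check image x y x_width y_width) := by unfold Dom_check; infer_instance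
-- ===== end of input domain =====

-- B replaces A's scan of the whole window with a per-pixel bounds test by computing the
-- clamped overlap rectangle up front and summing only over it, with the count as a product
-- of the two range sizes, so only the overlap is scanned (objective: faster; measured).

-- ===== PORT A =====
def check (image : List (List (List Int))) (x : Int) (y : Int) (x_width : Int) (y_width : Int) : List Int × Int :=
  (PySem.List.pyRange ((-1 * x_width).tdiv 2) (x_width.tdiv 2 + 1) 1).foldl
    (fun st x_ =>
      (PySem.List.pyRange ((-1 * y_width).tdiv 2) (y_width.tdiv 2 + 1) 1).foldl
        (fun st y_ =>
          if x + x_ ≥ 0 ∧ y + y_ ≥ 0 ∧ x + x_ < (image.length : Int) ∧ y + y_ < ((image.headD []).length : Int) then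
            let px := PySem.List.pyGetD (PySem.List.pyGetD image (x + x_) []) (y + y_) []
            ([PySem.List.pyGetD st.1 0 0 + PySem.List.pyGetD px 0 0,
              PySem.List.pyGetD st.1 1 0 + PySem.List.pyGetD px 1 0,
              PySem.List.pyGetD st.1 2 0 + PySem.List.pyGetD px 2 0], st.2 + 1)
          else st)
        st)
    ([0, 0, 0], 0)

-- ===== PORT B =====
def check_alt (image : List (List (List Int))) (x : Int) (y : Int) (x_width : Int) (y_width : Int) : List Int × Int :=
  let x_lo := max (x + (-1 * x_width).tdiv 2) 0
  let x_hi := min (x + x_width.tdiv 2) ((image.length : Int) - 1)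
  if x_lo ≤ x_hi then
    let y_lo := max (y + (-1 * y_width).tdiv 2) 0
    let y_hi := min (y + y_width.tdiv 2) (((image.headD []).length : Int) - 1)
    if y_lo ≤ y_hi then
      let cnt := (x_hi - x_lo + 1) * (y_hi - y_lo + 1)
      let acc := (PySem.List.pyRange x_lo (x_hi + 1) 1).foldl
        (fun acc xi =>
          let row := PySem.List.pyGetD image xi []
          (PySem.List.pyRange y_lo (y_hi + 1) 1).foldl
            (fun (acc : Int × Int × Int) yi =>
              let px := PySem.List.pyGetD row yi []
              (acc.1 + PySem.List.pyGetD px 0 0, acc.2.1 + PySem.List.pyGetD px 1 0,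
               acc.2.2 + PySem.List.pyGetD px 2 0))
            acc)
        ((0 : Int), (0 : Int), (0 : Int))
      ([acc.1, acc.2.1, acc.2.2], cnt)
    else ([0, 0, 0], 0)
  else ([0, 0, 0], 0)

-- ===== PRECONDITION & SPEC =====
-- Pre_check excludes exactly the inputs on which the Python A raises IndexError: some pixel
-- inside the clamped window rectangle is missing (a ragged row shorter than the first row)
-- or has fewer than 3 channels.
def Pre_check (image : List (List (List Int))) (x : Int) (y : Int) (x_width : Int) (y_width : Int) : Prop :=
  ∀ xi ∈ PySem.List.pyRange (max (x + (-1 * x_width).tdiv 2) 0) (min (x + x_width.tdiv 2 + 1) (image.length : Int)) 1,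
  ∀ yi ∈ PySem.List.pyRange (max (y + (-1 * y_width).tdiv 2) 0) (min (y + y_width.tdiv 2 + 1) ((image.headD []).length : Int)) 1,
    yi < ((PySem.List.pyGetD image xi []).length : Int) ∧
    3 ≤ (PySem.List.pyGetD (PySem.List.pyGetD image xi []) yi []).length
instance (image : List (List (List Int))) (x : Int) (y : Int) (x_width : Int) (y_width : Int) : Decidable (Pre_check image x y x_width y_width) := by unfold Pre_check; infer_instance

def pvWitness_check : List (List (List Int)) × Int × Int × Int × Int := ([[[1, 2, 3]]], 0, 0, 1, 1)

def Spec_check (image : List (List (List Int))) (x : Int) (y : Int) (x_width : Int) (y_width : Int) (out : List Int × Int) : Prop := out = check_alt image x y x_width y_width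
instance (image : List (List (List Int))) (x : Int) (y : Int) (x_width : Int) (y_width : Int) (out : List Int × Int) : Decidable (Spec_check image x y x_width y_width out) := by unfold Spec_check; infer_instance

-- ===== CLAIM (what is proved, stated in full; the proofs are below) =====
def Claim_equal_check : Prop := ∀ (image : List (List (List Int))) (x : Int) (y : Int) (x_width : Int) (y_width : Int), Dom_check image x y x_width y_width → Pre_check image x y x_width y_width → Spec_check image x y x_width y_width (check image x y x_width y_width)

-- ===== LEMMAS AND PROOFS =====

-- proof-only helpers naming the pieces of A's loop
def cellStep (image : List (List (List Int))) (st : List Int × Int) (i j : Int) : List Int × Int :=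
  let px := PySem.List.pyGetD (PySem.List.pyGetD image i []) j []
  ([PySem.List.pyGetD st.1 0 0 + PySem.List.pyGetD px 0 0,
    PySem.List.pyGetD st.1 1 0 + PySem.List.pyGetD px 1 0,
    PySem.List.pyGetD st.1 2 0 + PySem.List.pyGetD px 2 0], st.2 + 1)

def rowFold (image : List (List (List Int))) (Y1 Y2 : Int) (st : List Int × Int) (i : Int) : List Int × Int :=
  (PySem.List.pyRange Y1 Y2 1).foldl (fun st j => cellStep image st i j) st

def innerGuard (image : List (List (List Int))) (y y_width : Int) (st : List Int × Int) (i : Int) : List Int × Int :=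
  (PySem.List.pyRange ((-1 * y_width).tdiv 2) (y_width.tdiv 2 + 1) 1).foldl
    (fun st y_ =>
      if i ≥ 0 ∧ y + y_ ≥ 0 ∧ i < (image.length : Int) ∧ y + y_ < ((image.headD []).length : Int) then
        cellStep image st i (y + y_)
      else st) st

-- the canonical guard-free nested fold both ports reduce to (proof-only helper)
def cleanFold (image : List (List (List Int))) (X1 X2 Y1 Y2 : Int) : List Int × Int :=
  (PySem.List.pyRange X1 X2 1).foldl
    (fun st i =>
      (PySem.List.pyRange Y1 Y2 1).foldl
        (fun (st : List Int × Int) j =>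
          let px := PySem.List.pyGetD (PySem.List.pyGetD image i []) j []
          ([PySem.List.pyGetD st.1 0 0 + PySem.List.pyGetD px 0 0,
            PySem.List.pyGetD st.1 1 0 + PySem.List.pyGetD px 1 0,
            PySem.List.pyGetD st.1 2 0 + PySem.List.pyGetD px 2 0], st.2 + 1))
        st)
    ([0, 0, 0], 0)

theorem foldl_skip {α β : Type} (l : List α) (s : β) : l.foldl (fun s _ => s) s = s := by
  induction l generalizing s <;> simp_all [List.foldl]

theorem foldl_guard_false {α β : Type} (l : List α) (f : β → α → β) (p : α → Prop)
    [DecidablePred p] (h : ∀ a ∈ l, ¬ p a) (s : β) :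
    l.foldl (fun s a => if p a then f s a else s) s = s := by
  induction l generalizing s with
  | nil => rfl
  | cons a t ih =>
    simp only [List.foldl_cons, if_neg (h a (by simp))]
    exact ih (fun a ha => h a (by simp [ha])) s

theorem foldl_pyRange_shift {β : Type} (f : β → Int → β) (x : Int) :
    ∀ (k : Nat) (a b : Int) (s : β), (b - a).toNat ≤ k →
    (PySem.List.pyRange a b 1).foldl (fun s t => f s (x + t)) s
      = (PySem.List.pyRange (x + a) (x + b) 1).foldl f s := by
  intro k
  induction k with
  | zero =>
    intro a b s h
    rw [PySem.List.pyRange_one_eq_nil (show b ≤ a by omega),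
        PySem.List.pyRange_one_eq_nil (show x + b ≤ x + a by omega)]
    rfl
  | succ k ih =>
    intro a b s h
    by_cases hab : b ≤ a
    · rw [PySem.List.pyRange_one_eq_nil hab,
          PySem.List.pyRange_one_eq_nil (show x + b ≤ x + a by omega)]
      rfl
    · rw [show PySem.List.pyRange a b 1 = a :: PySem.List.pyRange (a + 1) b 1 from
            PySem.List.pyRange_one_cons (by omega),
          show PySem.List.pyRange (x + a) (x + b) 1
              = (x + a) :: PySem.List.pyRange (x + a + 1) (x + b) 1 from
            PySem.List.pyRange_one_cons (by omega)]
      simp only [List.foldl_cons]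
      rw [show x + a + 1 = x + (a + 1) by ring]
      exact ih (a + 1) b (f s (x + a)) (by omega)

theorem foldl_pyRange_clamp {β : Type} (f : β → Int → β) (c d : Int) :
    ∀ (k : Nat) (a b : Int) (s : β), (b - a).toNat ≤ k →
    (PySem.List.pyRange a b 1).foldl (fun s t => if c ≤ t ∧ t ≤ d then f s t else s) s
      = (PySem.List.pyRange (max a c) (min b (d + 1)) 1).foldl f s := by
  intro k
  induction k with
  | zero =>
    intro a b s h
    rw [PySem.List.pyRange_one_eq_nil (show b ≤ a by omega),
        PySem.List.pyRange_one_eq_nil (show min b (d + 1) ≤ max a c by omega)]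
    rfl
  | succ k ih =>
    intro a b s h
    by_cases hab : b ≤ a
    · rw [PySem.List.pyRange_one_eq_nil hab,
          PySem.List.pyRange_one_eq_nil (show min b (d + 1) ≤ max a c by omega)]
      rfl
    · rw [show PySem.List.pyRange a b 1 = a :: PySem.List.pyRange (a + 1) b 1 from
            PySem.List.pyRange_one_cons (by omega)]
      simp only [List.foldl_cons]
      by_cases hc : c ≤ a
      · by_cases hd : a ≤ d
        · rw [if_pos ⟨hc, hd⟩, ih (a + 1) b (f s a) (by omega),
              show max (a + 1) c = a + 1 by omega,
              show PySem.List.pyRange (max a c) (min b (d + 1)) 1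
                  = (max a c) :: PySem.List.pyRange (max a c + 1) (min b (d + 1)) 1 from
                PySem.List.pyRange_one_cons (by omega),
              show max a c = a by omega]
          simp only [List.foldl_cons]
        · rw [if_neg (by omega),
              foldl_guard_false _ f _ (fun t ht => by
                rw [PySem.List.mem_pyRange_one] at ht; omega) s,
              PySem.List.pyRange_one_eq_nil (show min b (d + 1) ≤ max a c by omega)]
          rfl
      · rw [if_neg (by omega), ih (a + 1) b s (by omega),
            show max (a + 1) c = max a c by omega]

theorem inner_bridge (l : List Int) (g : Int → List Int) :
    ∀ (r gg b c : Int),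
    l.foldl (fun (st : List Int × Int) j =>
        ([PySem.List.pyGetD st.1 0 0 + PySem.List.pyGetD (g j) 0 0,
          PySem.List.pyGetD st.1 1 0 + PySem.List.pyGetD (g j) 1 0,
          PySem.List.pyGetD st.1 2 0 + PySem.List.pyGetD (g j) 2 0], st.2 + 1)) ([r, gg, b], c)
      = (let t := l.foldl (fun (acc : Int × Int × Int) j =>
            (acc.1 + PySem.List.pyGetD (g j) 0 0, acc.2.1 + PySem.List.pyGetD (g j) 1 0,
             acc.2.2 + PySem.List.pyGetD (g j) 2 0)) (r, gg, b)
         ([t.1, t.2.1, t.2.2], c + l.length)) := by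
  induction l with
  | nil => intro r gg b c; simp
  | cons j t ih =>
    intro r gg b c
    simp only [List.foldl_cons, List.length_cons]
    have h0 : PySem.List.pyGetD [r, gg, b] (0 : Int) (0 : Int) = r := by
      simp [PySem.List.pyGetD]
    have h1 : PySem.List.pyGetD [r, gg, b] (1 : Int) (0 : Int) = gg := by
      simp [PySem.List.pyGetD]
    have h2 : PySem.List.pyGetD [r, gg, b] (2 : Int) (0 : Int) = b := by
      simp [PySem.List.pyGetD]
    rw [h0, h1, h2, ih]
    simp only [Prod.mk.injEq]
    exact ⟨trivial, by push_cast; ring⟩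

theorem outer_bridge (Lx Ly : List Int) (g : Int → Int → List Int) :
    ∀ (r gg b c : Int),
    Lx.foldl (fun st i =>
        Ly.foldl (fun (st : List Int × Int) j =>
          ([PySem.List.pyGetD st.1 0 0 + PySem.List.pyGetD (g i j) 0 0,
            PySem.List.pyGetD st.1 1 0 + PySem.List.pyGetD (g i j) 1 0,
            PySem.List.pyGetD st.1 2 0 + PySem.List.pyGetD (g i j) 2 0], st.2 + 1)) st)
      ([r, gg, b], c)
      = (let t := Lx.foldl (fun acc i =>
            Ly.foldl (fun (acc : Int × Int × Int) j =>
              (acc.1 + PySem.List.pyGetD (g i j) 0 0, acc.2.1 + PySem.List.pyGetD (g i j) 1 0,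
               acc.2.2 + PySem.List.pyGetD (g i j) 2 0)) acc) (r, gg, b)
         ([t.1, t.2.1, t.2.2], c + (Lx.length : Int) * (Ly.length : Int))) := by
  induction Lx with
  | nil => intro r gg b c; simp
  | cons i tx ih =>
    intro r gg b c
    simp only [List.foldl_cons, List.length_cons]
    rw [inner_bridge Ly (g i) r gg b c]
    simp only []
    rw [ih]
    simp only [Prod.mk.injEq]
    exact ⟨trivial, by push_cast; ring⟩

theorem check_eq_alt (image : List (List (List Int))) (x y x_width y_width : Int) :
    check image x y x_width y_width = check_alt image x y x_width y_width := by
  have hIG : ∀ (st : List Int × Int) (i : Int),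
      innerGuard image y y_width st i
        = if 0 ≤ i ∧ i ≤ (image.length : Int) - 1 then
            rowFold image (max (y + (-1 * y_width).tdiv 2) 0)
              (min (y + y_width.tdiv 2 + 1) ((image.headD []).length : Int)) st i
          else st := by
    intro st i
    by_cases hP : 0 ≤ i ∧ i ≤ (image.length : Int) - 1
    · rw [if_pos hP]
      unfold innerGuard
      have hfun : (fun (st : List Int × Int) y_ =>
            if i ≥ 0 ∧ y + y_ ≥ 0 ∧ i < (image.length : Int) ∧ y + y_ < ((image.headD []).length : Int) then
              cellStep image st i (y + y_)
            else st)
          = (fun (st : List Int × Int) y_ =>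
              (fun (st : List Int × Int) j =>
                if 0 ≤ j ∧ j ≤ ((image.headD []).length : Int) - 1 then cellStep image st i j
                else st) st (y + y_)) := by
        funext st y_
        refine if_congr ?_ rfl rfl
        constructor <;> intro h <;> exact ⟨by omega, by omega⟩
      rw [hfun,
          foldl_pyRange_shift
            (fun (st : List Int × Int) j =>
              if 0 ≤ j ∧ j ≤ ((image.headD []).length : Int) - 1 then cellStep image st i j else st)
            y _ ((-1 * y_width).tdiv 2) (y_width.tdiv 2 + 1) st (le_refl _),
          foldl_pyRange_clamp (fun (st : List Int × Int) j => cellStep image st i j)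
            0 (((image.headD []).length : Int) - 1) _
            (y + (-1 * y_width).tdiv 2) (y + (y_width.tdiv 2 + 1)) st (le_refl _),
          show y + (y_width.tdiv 2 + 1) = y + y_width.tdiv 2 + 1 by ring,
          show ((image.headD []).length : Int) - 1 + 1 = ((image.headD []).length : Int) by ring]
      rfl
    · rw [if_neg hP]
      unfold innerGuard
      exact foldl_guard_false _ _ _ (fun y_ _ h => hP ⟨by omega, by omega⟩) st
  have hA : check image x y x_width y_width
      = cleanFold image (max (x + (-1 * x_width).tdiv 2) 0)
          (min (x + x_width.tdiv 2 + 1) (image.length : Int))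
          (max (y + (-1 * y_width).tdiv 2) 0)
          (min (y + y_width.tdiv 2 + 1) ((image.headD []).length : Int)) := by
    calc check image x y x_width y_width
        = (PySem.List.pyRange (x + (-1 * x_width).tdiv 2) (x + (x_width.tdiv 2 + 1)) 1).foldl
            (innerGuard image y y_width) ([0, 0, 0], 0) :=
          foldl_pyRange_shift (innerGuard image y y_width) x _
            ((-1 * x_width).tdiv 2) (x_width.tdiv 2 + 1) ([0, 0, 0], 0) (le_refl _)
      _ = (PySem.List.pyRange (x + (-1 * x_width).tdiv 2) (x + (x_width.tdiv 2 + 1)) 1).foldl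
            (fun st i =>
              if 0 ≤ i ∧ i ≤ (image.length : Int) - 1 then
                rowFold image (max (y + (-1 * y_width).tdiv 2) 0)
                  (min (y + y_width.tdiv 2 + 1) ((image.headD []).length : Int)) st i
              else st) ([0, 0, 0], 0) := by
          rw [funext fun st => funext fun i => hIG st i]
      _ = (PySem.List.pyRange (max (x + (-1 * x_width).tdiv 2) 0)
            (min (x + (x_width.tdiv 2 + 1)) (((image.length : Int) - 1) + 1)) 1).foldl
            (rowFold image (max (y + (-1 * y_width).tdiv 2) 0)
              (min (y + y_width.tdiv 2 + 1) ((image.headD []).length : Int))) ([0, 0, 0], 0) :=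
          foldl_pyRange_clamp _ 0 ((image.length : Int) - 1) _ _ _ _ (le_refl _)
      _ = cleanFold image (max (x + (-1 * x_width).tdiv 2) 0)
            (min (x + x_width.tdiv 2 + 1) (image.length : Int))
            (max (y + (-1 * y_width).tdiv 2) 0)
            (min (y + y_width.tdiv 2 + 1) ((image.headD []).length : Int)) := by
          rw [show x + (x_width.tdiv 2 + 1) = x + x_width.tdiv 2 + 1 by ring,
              show ((image.length : Int) - 1) + 1 = (image.length : Int) by ring]
          rfl
  have hB : check_alt image x y x_width y_width
      = cleanFold image (max (x + (-1 * x_width).tdiv 2) 0)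
          (min (x + x_width.tdiv 2 + 1) (image.length : Int))
          (max (y + (-1 * y_width).tdiv 2) 0)
          (min (y + y_width.tdiv 2 + 1) ((image.headD []).length : Int)) := by
    unfold check_alt
    by_cases hx : max (x + (-1 * x_width).tdiv 2) 0
        ≤ min (x + x_width.tdiv 2) ((image.length : Int) - 1)
    · rw [if_pos hx]
      by_cases hy : max (y + (-1 * y_width).tdiv 2) 0
          ≤ min (y + y_width.tdiv 2) (((image.headD []).length : Int) - 1)
      · rw [if_pos hy]
        unfold cleanFold
        rw [outer_bridge
              (PySem.List.pyRange (max (x + (-1 * x_width).tdiv 2) 0)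
                (min (x + x_width.tdiv 2 + 1) (image.length : Int)) 1)
              (PySem.List.pyRange (max (y + (-1 * y_width).tdiv 2) 0)
                (min (y + y_width.tdiv 2 + 1) ((image.headD []).length : Int)) 1)
              (fun i j => PySem.List.pyGetD (PySem.List.pyGetD image i []) j []) 0 0 0 0]
        simp only [Prod.mk.injEq, PySem.List.length_pyRange_one]
        rw [Int.toNat_of_nonneg (by omega), Int.toNat_of_nonneg (by omega),
            show min (x + x_width.tdiv 2 + 1) (image.length : Int)
                = min (x + x_width.tdiv 2) ((image.length : Int) - 1) + 1 by omega,
            show min (y + y_width.tdiv 2 + 1) ((image.headD []).length : Int)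
                = min (y + y_width.tdiv 2) (((image.headD []).length : Int) - 1) + 1 by omega]
        exact ⟨rfl, by ring⟩
      · rw [if_neg hy]
        unfold cleanFold
        rw [PySem.List.pyRange_one_eq_nil
              (show min (y + y_width.tdiv 2 + 1) ((image.headD []).length : Int)
                  ≤ max (y + (-1 * y_width).tdiv 2) 0 by omega)]
        simp only [List.foldl_nil]
        rw [foldl_skip]
    · rw [if_neg hx]
      unfold cleanFold
      rw [PySem.List.pyRange_one_eq_nil
            (show min (x + x_width.tdiv 2 + 1) (image.length : Int)
                ≤ max (x + (-1 * x_width).tdiv 2) 0 by omega)]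
      rfl
  rw [hA, hB]

-- ===== VERDICT (by name: the statement is the Claim_ definition above) =====
theorem check_spec : Claim_equal_check := by
  intro image x y x_width y_width _ _
  unfold Spec_check
  exact check_eq_alt image x y x_width y_width
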